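-- pv_equiv track=rewrite | github.com/tropical42/CSC-110 | Assignment 5/assign5a.py | compute_only_eaters
-- ===== SOURCE A (Python) =====
-- def compute_only_eaters(life):
--
-- 	eaters = []
-- 	eaten = []
-- 	for i in life:
-- 		eaters.append(i)
--
-- 		for j in life[i]:
-- 			eaten.append(j)
--
-- 	only_eaters = []
--
-- 	for i in eaters:
-- 		if i not in eaten:
-- 			only_eaters.append(i)
--
-- 	return sorted(only_eaters)
-- ===== SOURCE B (Python) =====
-- def compute_only_eaters(life):
--     # Sort the keys and the flattened prey names once, then emit the keys
--     # that never appear among the prey with a single two-pointer merge scan.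
--     keys = sorted(life)
--     eaten = sorted(p for preys in life.values() for p in preys)
--     out = []
--     i = j = 0
--     while i < len(keys):
--         if j < len(eaten) and eaten[j] < keys[i]:
--             j += 1
--         elif j < len(eaten) and eaten[j] == keys[i]:
--             i += 1
--         else:
--             out.append(keys[i])
--             i += 1
--     return out
-- ===== Notes on version B (the rewrite author's own statement) =====
-- stated objective: alternative
-- what changed: Instead of accumulating eaters/eaten lists and filtering by membership before sorting, B sorts the keys and the flattened prey names first and produces the answer by a single two-pointer merge scan over the two sorted lists; the membership-test loop disappears.
import Mathlib
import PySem

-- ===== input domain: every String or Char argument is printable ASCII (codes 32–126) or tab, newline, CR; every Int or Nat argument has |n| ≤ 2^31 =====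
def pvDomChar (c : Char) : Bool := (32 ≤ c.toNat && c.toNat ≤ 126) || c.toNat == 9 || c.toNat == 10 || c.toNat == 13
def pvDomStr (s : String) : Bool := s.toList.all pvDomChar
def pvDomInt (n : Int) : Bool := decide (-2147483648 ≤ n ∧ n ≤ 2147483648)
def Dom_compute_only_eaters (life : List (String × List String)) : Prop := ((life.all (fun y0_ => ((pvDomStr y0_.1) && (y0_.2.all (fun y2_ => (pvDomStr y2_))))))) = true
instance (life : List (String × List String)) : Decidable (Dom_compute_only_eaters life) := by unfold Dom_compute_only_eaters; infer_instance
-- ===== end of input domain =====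

-- B sorts the keys and the flattened prey names first and produces the result by a
-- two-pointer merge scan over the two sorted lists, so A's membership-filter loop
-- disappears; objective: alternative (same overall cost, different algorithm).

-- ===== PORT A =====
def compute_only_eaters (life : List (String × List String)) : List String :=
  -- 'for i in life: eaters.append(i); for j in life[i]: eaten.append(j)'
  let ee := life.foldl
    (fun (p : List String × List String) kv =>
      (p.1 ++ [kv.1], p.2 ++ (PySem.Dict.mk life).getD kv.1 []))
    ([], [])
  -- 'for i in eaters: if i not in eaten: only_eaters.append(i)'
  let only := ee.1.foldl (fun acc i => if i ∈ ee.2 then acc else acc ++ [i]) []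
  PySem.List.sorted only (fun x => x) false

-- ===== PORT B =====
-- the 'while i < len(keys): …' two-pointer loop of Source B, on indices i, j
def pvMergeLoop (keys eaten : List String) (i j : Nat) (out : List String) : List String :=
  if h : i < keys.length then
    if hj : j < eaten.length then
      if eaten[j] < keys[i] then pvMergeLoop keys eaten i (j+1) out
      else if eaten[j] = keys[i] then pvMergeLoop keys eaten (i+1) j out
      else pvMergeLoop keys eaten (i+1) j (out ++ [keys[i]])
    else pvMergeLoop keys eaten (i+1) j (out ++ [keys[i]])
  else out
termination_by (keys.length - i) + (eaten.length - j)

def compute_only_eaters_alt (life : List (String × List String)) : List String :=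
  let keys := PySem.List.sorted (life.map Prod.fst) (fun x => x) false
  let eaten := PySem.List.sorted (life.flatMap Prod.snd) (fun x => x) false
  pvMergeLoop keys eaten 0 0 []

-- ===== PRECONDITION & SPEC =====
-- Pre_: the keys are pairwise distinct — exactly the association lists that represent a
-- Python dict (a Python dict can never carry duplicate keys, so no Python-reachable
-- input is excluded).
def Pre_compute_only_eaters (life : List (String × List String)) : Prop :=
  (life.map Prod.fst).Nodup
instance (life : List (String × List String)) : Decidable (Pre_compute_only_eaters life) := by
  unfold Pre_compute_only_eaters; infer_instance
def pvWitness_compute_only_eaters : (List (String × List String)) :=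
  [("cat", ["mouse"]), ("mouse", [])]
def Spec_compute_only_eaters (life : List (String × List String)) (out : List String) : Prop := out = compute_only_eaters_alt life
instance (life : List (String × List String)) (out : List String) : Decidable (Spec_compute_only_eaters life out) := by unfold Spec_compute_only_eaters; infer_instance

-- ===== CLAIM (what is proved, stated in full; the proofs are below) =====
def Claim_equal_compute_only_eaters : Prop := ∀ (life : List (String × List String)), Dom_compute_only_eaters life → Pre_compute_only_eaters life → Spec_compute_only_eaters life (compute_only_eaters life)

-- ===== LEMMAS AND PROOFS =====

-- with distinct keys, the dict lookup of a pair's key returns that pair's value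
theorem pv_lookup_self (life : List (String × List String)) (kv : String × List String)
    (hnd : (life.map Prod.fst).Nodup) (hmem : kv ∈ life) :
    (PySem.Dict.mk life).getD kv.1 [] = kv.2 := by
  induction life with
  | nil => cases hmem
  | cons hd tl ih =>
    simp only [List.map_cons, List.nodup_cons] at hnd
    rcases List.mem_cons.mp hmem with h | h
    · subst h
      simp [PySem.Dict.getD, PySem.Dict.get?]
    · have hne : hd.1 ≠ kv.1 := fun he => hnd.1 (he ▸ (List.mem_map.mpr ⟨kv, h, rfl⟩))
      have h2 := ih hnd.2 h
      simp only [PySem.Dict.getD, PySem.Dict.get?] at h2 ⊢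
      simpa [hne] using h2

-- A's accumulation loop produces (keys, flattened prey lists)
theorem pv_accum (l : List (String × List String)) (a b : List String) :
    l.foldl (fun (p : List String × List String) kv => (p.1 ++ [kv.1], p.2 ++ kv.2)) (a, b)
      = (a ++ l.map Prod.fst, b ++ l.flatMap Prod.snd) := by
  induction l generalizing a b with
  | nil => simp
  | cons hd tl ih => simp [ih]

-- A's filter loop
theorem pv_filterLoop (e : List String) (l acc : List String) :
    l.foldl (fun acc i => if i ∈ e then acc else acc ++ [i]) acc
      = acc ++ l.filter (fun i => !decide (i ∈ e)) := by
  induction l generalizing acc with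
  | nil => simp
  | cons hd tl ih =>
    by_cases h : hd ∈ e <;> simp [h, ih]

-- the two-pointer merge scan over two ≤-sorted lists computes the "not a member" filter
theorem pvMergeLoop_eq (keys eaten : List String)
    (hk : keys.Pairwise (· ≤ ·)) (he : eaten.Pairwise (· ≤ ·)) :
    ∀ i j out, pvMergeLoop keys eaten i j out
      = out ++ (keys.drop i).filter (fun k => !decide (k ∈ eaten.drop j)) := by
  intro i j out
  induction i, j, out using pvMergeLoop.induct keys eaten with
  | case1 i j out h hj hlt ih =>
    -- eaten[j] < keys[i] : advance j; eaten[j] matches nothing in keys.drop i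
    rw [pvMergeLoop]; simp only [h, hj, hlt, dif_pos, if_pos]
    rw [ih]
    congr 1
    apply List.filter_congr
    intro k hkmem
    have hdk := List.drop_eq_getElem_cons h
    have hde := List.drop_eq_getElem_cons hj
    have hki : keys[i] ≤ k := by
      have hp : (keys.drop i).Pairwise (· ≤ ·) := hk.sublist (List.drop_sublist i keys)
      rw [hdk] at hp hkmem
      rcases List.mem_cons.mp hkmem with rfl | hm
      · exact le_refl _
      · exact (List.pairwise_cons.mp hp).1 k hm
    have hne : k ≠ eaten[j] := fun hEq => absurd (lt_of_lt_of_le hlt hki) (by simp [hEq])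
    simp only [hde, List.mem_cons]
    simp [hne]
  | case2 i j out h hj hlt heq ih =>
    -- eaten[j] = keys[i] : skip keys[i]
    rw [pvMergeLoop]; simp only [h, hj, heq, dif_pos, if_pos]
    rw [ih]
    have hmem : keys[i] ∈ eaten.drop j := by
      rw [List.drop_eq_getElem_cons hj]; simp [heq]
    simp only [List.drop_eq_getElem_cons h, List.filter_cons]
    simp [hmem]
  | case3 i j out h hj hlt hne ih =>
    -- keys[i] < eaten[j] : keep keys[i]
    rw [pvMergeLoop]; simp only [h, hj, hlt, hne, dif_pos, if_neg, not_false_iff]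
    rw [ih]
    have hgt : keys[i] < eaten[j] := by
      rcases lt_trichotomy (eaten[j]) (keys[i]) with hc | hc | hc
      · exact absurd hc hlt
      · exact absurd hc hne
      · exact hc
    have hnm : keys[i] ∉ eaten.drop j := by
      intro hm
      have hp : (eaten.drop j).Pairwise (· ≤ ·) := he.sublist (List.drop_sublist j eaten)
      rw [List.drop_eq_getElem_cons hj] at hp hm
      rcases List.mem_cons.mp hm with hEq | hm2
      · exact absurd hEq (ne_of_lt hgt)
      · exact absurd (lt_of_lt_of_le hgt ((List.pairwise_cons.mp hp).1 _ hm2)) (by simp)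
    simp only [List.drop_eq_getElem_cons h, List.filter_cons]
    simp [hnm]
  | case4 i j out h hj ih =>
    -- j exhausted : keep keys[i]
    rw [pvMergeLoop]; simp only [h, hj, dif_pos, dif_neg, not_false_iff]
    rw [ih]
    have hde : eaten.drop j = [] := List.drop_eq_nil_of_le (le_of_not_gt hj)
    simp only [hde, List.drop_eq_getElem_cons h, List.filter_cons]
    simp
  | case5 i j out h =>
    rw [pvMergeLoop]
    simp [h, List.drop_eq_nil_of_le (le_of_not_gt h)]

-- ===== VERDICT (by name: the statement is the Claim_ definition above) =====
theorem compute_only_eaters_spec : Claim_equal_compute_only_eaters := by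
  intro life _ hpre
  unfold Spec_compute_only_eaters compute_only_eaters compute_only_eaters_alt
  -- A's accumulation loop yields the key list and the flattened prey list
  have hcongr : life.foldl
      (fun (p : List String × List String) kv =>
        (p.1 ++ [kv.1], p.2 ++ (PySem.Dict.mk life).getD kv.1 []))
      ([], [])
      = life.foldl (fun (p : List String × List String) kv => (p.1 ++ [kv.1], p.2 ++ kv.2)) ([], []) := by
    apply PySem.List.foldl_congr_mem
    intro acc kv hkv
    rw [pv_lookup_self life kv hpre hkv]
  rw [hcongr]
  simp only [pv_accum, pv_filterLoop, List.nil_append]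
  set keys := life.map Prod.fst with hkeys
  set eaten := life.flatMap Prod.snd with heaten
  -- B's merge scan equals a filter over the sorted key list
  rw [pvMergeLoop_eq _ _ (PySem.List.sorted_pairwise keys (fun x => x))
        (PySem.List.sorted_pairwise eaten (fun x => x)) 0 0 []]
  simp only [List.drop_zero, List.nil_append]
  -- membership in sorted eaten = membership in eaten (rewrite inside the decide)
  simp only [PySem.List.mem_sorted]
  -- sorted (keys.filter p) = (sorted keys).filter p : both are ≤-sorted permutations
  apply PySem.List.sorted_id_eq_of_perm_of_pairwise
  · exact (PySem.List.sorted_perm keys (fun x => x) false).filter _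
  · exact (PySem.List.sorted_pairwise keys (fun x => x)).sublist List.filter_sublist
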